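-- pv_equiv track=rewrite | github.com/will-duncan/p53mdm2 | ode_functions.py | lower_double_id
-- ===== SOURCE A (Python) =====
-- def lower_double_id(output):
--     '''
--     Returns label of "Large" or "Small" for a particular trajectory for parameter node where we expect birythmicity
--     to be of lower inner loop type.
--     Args:
--     output : list of arrays identifying domains through which trajectory passes (result of
--     get_periodic_domains(trajectory))
--     '''
--     newoutput = []#convert output from arrays to strings for easier checks
--     for i in output:
--         string = ''
--         for j in i:
--             string = string + str(j)
--         newoutput.append(string)
--
--     top_domains = ['202','102','002','212','112','012']
--     for domain in top_domains:
--         if domain in newoutput: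
--             return 'Large'
--         else:
--             pass
--     return 'Small'
-- ===== SOURCE B (Python) =====
-- TOP_DOMAINS = {'202', '102', '002', '212', '112', '012'}
--
-- def lower_double_id(output):
--     for i in output:
--         string = ''
--         for j in i:
--             string = string + str(j)
--         if string in TOP_DOMAINS:
--             return 'Large'
--     return 'Small'
-- ===== Notes on version B (the rewrite author's own statement) =====
-- stated objective: simpler
-- what changed: Inverted the control flow: instead of building a full list of domain strings and then scanning it once per each of the six top domains, B makes a single pass over output, building each row's string and returning 'Large' immediately if it lies in a precomputed set of top domains.
import Mathlib
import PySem

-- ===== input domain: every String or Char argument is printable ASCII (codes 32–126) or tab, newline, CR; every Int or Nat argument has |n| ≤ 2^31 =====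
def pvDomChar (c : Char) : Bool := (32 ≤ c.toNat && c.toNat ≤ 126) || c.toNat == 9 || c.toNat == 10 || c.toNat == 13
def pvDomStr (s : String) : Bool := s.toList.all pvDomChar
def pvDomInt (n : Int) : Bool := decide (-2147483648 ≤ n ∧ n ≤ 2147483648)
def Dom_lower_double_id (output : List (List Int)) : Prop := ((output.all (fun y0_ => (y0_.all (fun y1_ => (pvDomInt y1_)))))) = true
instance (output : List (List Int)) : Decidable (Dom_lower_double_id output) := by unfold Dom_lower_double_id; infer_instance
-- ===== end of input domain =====

-- B changes the control flow (single early-return pass over output against a precomputed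
-- set, instead of A's list-building pass followed by six membership scans); return values agree.

-- ===== PORT A =====
-- inner loop: string = string + str(j)
def lowerA_row (i : List Int) : String :=
  i.foldl (fun s j => s ++ PySem.Int.toStr j) ""

-- first loop: newoutput.append(string)
def lowerA_newoutput (output : List (List Int)) : List String :=
  output.foldl (fun acc i => acc ++ [lowerA_row i]) []

-- second loop: for domain in top_domains: if domain in newoutput: return 'Large'
def lowerA_scan (doms : List String) (newoutput : List String) : String :=
  match doms with
  | [] => "Small"
  | d :: rest => if d ∈ newoutput then "Large" else lowerA_scan rest newoutput

def lower_double_id (output : List (List Int)) : String :=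
  lowerA_scan ["202", "102", "002", "212", "112", "012"] (lowerA_newoutput output)

-- ===== PORT B =====
def lowerB_top : PySem.Set String :=
  PySem.Set.ofList ["202", "102", "002", "212", "112", "012"]

def lowerB_row (i : List Int) : String :=
  i.foldl (fun s j => s ++ PySem.Int.toStr j) ""

def lower_double_id_alt (output : List (List Int)) : String :=
  match output with
  | [] => "Small"
  | i :: rest => if lowerB_row i ∈ lowerB_top then "Large" else lower_double_id_alt rest

-- ===== PRECONDITION & SPEC =====
def Spec_lower_double_id (output : List (List Int)) (out : String) : Prop := out = lower_double_id_alt output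
instance (output : List (List Int)) (out : String) : Decidable (Spec_lower_double_id output out) := by unfold Spec_lower_double_id; infer_instance

-- ===== CLAIM (what is proved, stated in full; the proofs are below) =====
def Claim_equal_lower_double_id : Prop := ∀ (output : List (List Int)), Dom_lower_double_id output → Spec_lower_double_id output (lower_double_id output)

-- ===== LEMMAS AND PROOFS =====

theorem lowerA_scan_eq (doms ns : List String) :
    lowerA_scan doms ns = if ∃ d ∈ doms, d ∈ ns then "Large" else "Small" := by
  induction doms with
  | nil => simp [lowerA_scan]
  | cons d rest ih =>
    simp only [lowerA_scan, ih]
    by_cases h : d ∈ ns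
    · simp [h]
    · simp [h]

theorem lowerA_newoutput_eq (output : List (List Int)) :
    lowerA_newoutput output = output.map lowerA_row := by
  unfold lowerA_newoutput
  rw [PySem.List.foldl_append_eq_flatMap (g := fun i => [lowerA_row i])]
  induction output with
  | nil => simp
  | cons i rest ih => simp_all [List.flatMap]

theorem lowerB_eq (output : List (List Int)) :
    lower_double_id_alt output =
      if ∃ i ∈ output, lowerB_row i ∈ lowerB_top then "Large" else "Small" := by
  induction output with
  | nil => simp [lower_double_id_alt]
  | cons i rest ih =>
    simp only [lower_double_id_alt, ih]
    by_cases h : lowerB_row i ∈ lowerB_top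
    · simp [h]
    · simp [h]

-- ===== VERDICT (by name: the statement is the Claim_ definition above) =====
theorem lower_double_id_spec : Claim_equal_lower_double_id := by
  intro output _
  unfold Spec_lower_double_id
  rw [lower_double_id, lowerA_scan_eq, lowerA_newoutput_eq, lowerB_eq]
  rw [show lowerB_row = lowerA_row from rfl,
      show lowerB_top = ["202", "102", "002", "212", "112", "012"] from by decide]
  have h : (∃ d ∈ (["202", "102", "002", "212", "112", "012"] : List String),
        d ∈ output.map lowerA_row) ↔
      (∃ i ∈ output, lowerA_row i ∈ (["202", "102", "002", "212", "112", "012"] : List String)) := by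
    simp only [List.mem_map]
    constructor
    · rintro ⟨d, hd, i, hi, rfl⟩; exact ⟨i, hi, hd⟩
    · rintro ⟨i, hi, hm⟩; exact ⟨_, hm, i, hi, rfl⟩
  simp only [h]
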